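-- pv_equiv track=rewrite | github.com/Orewek/Pass_Creator | tune_password/tune_logic.py | sanitize_password
-- ===== SOURCE A (Python) =====
-- def sanitize_password(password: str, types: str) -> str:
--     """
--     Change lower => upper; upper => lower; deleting digits from the password.
--
--     Args:
--     ----
--         password: User password
--         types: type of letter that we should remove from a password
--
--     Return:
--     ------
--         password: User password
--     """
--     if 'up' in types:
--         password = password.lower()
--
--     if 'low' in types:
--         password = password.upper()
--
--     if 'dig' in types:
--         password = ''.join([i for i in password if not i.isdigit()])
--
--     return password
-- ===== SOURCE B (Python) =====
-- def sanitize_password(password: str, types: str) -> str: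
--     # One combined pass: compute the flags once, transform/skip each character once.
--     up = 'up' in types
--     low = 'low' in types
--     dig = 'dig' in types
--     out = []
--     for c in password:
--         if up:
--             c = c.lower()
--         if low:
--             c = c.upper()
--         if not (dig and c.isdigit()):
--             out.append(c)
--     return ''.join(out)
-- ===== Notes on version B (the rewrite author's own statement) =====
-- stated objective: alternative
-- what changed: B computes the three membership flags once and does a single per-character pass (lower, then upper, then digit-skip on each char) instead of A's three sequential whole-string rewrites.
import Mathlib
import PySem

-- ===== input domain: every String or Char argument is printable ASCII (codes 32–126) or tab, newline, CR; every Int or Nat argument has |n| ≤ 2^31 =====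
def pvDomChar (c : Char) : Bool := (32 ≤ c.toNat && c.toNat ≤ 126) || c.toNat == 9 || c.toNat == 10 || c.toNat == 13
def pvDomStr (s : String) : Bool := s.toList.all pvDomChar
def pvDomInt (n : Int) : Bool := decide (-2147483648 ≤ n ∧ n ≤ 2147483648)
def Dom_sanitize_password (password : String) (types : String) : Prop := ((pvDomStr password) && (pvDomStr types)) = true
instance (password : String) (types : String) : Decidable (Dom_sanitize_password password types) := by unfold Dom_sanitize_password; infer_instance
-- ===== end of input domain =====

-- B computes the three membership flags once and performs one combined per-character pass
-- (lower, then upper, then digit-skip) instead of A's three sequential whole-string rewrites.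


-- ===== PORT A =====
-- Literal transliteration: three sequential rebindings of `password`.
-- ''.join([i for i in password if not i.isdigit()]) is String.ofList of the filtered
-- character list ('i' is a one-character string, whose .isdigit() is Chars.isdigit of the char).
def sanitize_password (password : String) (types : String) : String :=
  let password := if PySem.Str.isIn "up" types then PySem.Str.lower password else password
  let password := if PySem.Str.isIn "low" types then PySem.Str.upper password else password
  let password := if PySem.Str.isIn "dig" types then
      String.ofList (password.toList.filter (fun i => !(PySem.Chars.isdigit i)))
    else password
  password

-- ===== PORT B =====
-- The loop body of Source B: transform one character, keep it unless (dig && digit).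
def pvLoop (up low dig : Bool) : List Char → List Char
  | [] => []
  | c :: rest =>
    let c := if up then PySem.Chars.lowerChar c else c
    let c := if low then PySem.Chars.upperChar c else c
    if dig && PySem.Chars.isdigit c then pvLoop up low dig rest
    else c :: pvLoop up low dig rest

def sanitize_password_alt (password : String) (types : String) : String :=
  let up := PySem.Str.isIn "up" types
  let low := PySem.Str.isIn "low" types
  let dig := PySem.Str.isIn "dig" types
  String.ofList (pvLoop up low dig password.toList)

-- ===== PRECONDITION & SPEC =====
def Spec_sanitize_password (password : String) (types : String) (out : String) : Prop := out = sanitize_password_alt password types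
instance (password : String) (types : String) (out : String) : Decidable (Spec_sanitize_password password types out) := by unfold Spec_sanitize_password; infer_instance

-- ===== CLAIM (what is proved, stated in full; the proofs are below) =====
def Claim_equal_sanitize_password : Prop := ∀ (password : String) (types : String), Dom_sanitize_password password types → Spec_sanitize_password password types (sanitize_password password types)

-- ===== LEMMAS AND PROOFS =====

-- fold the three separate passes into the single combined pass
theorem pvLoop_eq (up low dig : Bool) (l : List Char) :
    pvLoop up low dig l =
      (if dig then
        ((if low then PySem.Chars.upper (if up then PySem.Chars.lower l else l)
          else (if up then PySem.Chars.lower l else l)).filter (fun i => !(PySem.Chars.isdigit i)))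
      else (if low then PySem.Chars.upper (if up then PySem.Chars.lower l else l)
            else (if up then PySem.Chars.lower l else l))) := by
  induction l with
  | nil => cases up <;> cases low <;> cases dig <;> simp [pvLoop, PySem.Chars.lower, PySem.Chars.upper]
  | cons c rest ih =>
    cases up <;> cases low <;> cases dig <;>
      simp [pvLoop, PySem.Chars.lower, PySem.Chars.upper, List.filter_cons, ih] <;>
      split_ifs <;> simp_all

-- ===== VERDICT (by name: the statement is the Claim_ definition above) =====
theorem sanitize_password_spec : Claim_equal_sanitize_password := by
  intro password types _
  unfold Spec_sanitize_password sanitize_password sanitize_password_alt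
  simp only []
  rw [pvLoop_eq]
  split_ifs <;>
    simp only [PySem.Str.lower, PySem.Str.upper, String.ofList_toList,
      String.toList_ofList]
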